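-- pv_equiv track=rewrite | github.com/SalatielBairros/CC_Python_Exercises | Part2/18_permuted_strings.py | get_permutation_list
-- ===== SOURCE A (Python) =====
-- def get_permutation_list(input_str, output_str):
--     permutationIndex = []
--
--     for co in output_str:
--       for i in range(len(input_str)):
--         if(co == input_str[i] and i not in permutationIndex):
--           permutationIndex.append(i)
--           break
--
--     return permutationIndex
-- ===== SOURCE B (Python) =====
-- def get_permutation_list(input_str, output_str):
--     # Build char -> stack of its indices in DECREASING order (one backward pass),
--     # so pop() yields the smallest unused index in O(1).
--     queues = {}
--     for i in range(len(input_str) - 1, -1, -1):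
--         queues.setdefault(input_str[i], []).append(i)
--     result = []
--     for ch in output_str:
--         q = queues.get(ch)
--         if q:
--             result.append(q.pop())
--     return result
-- ===== Notes on version B (the rewrite author's own statement) =====
-- stated objective: faster
-- what changed: Replaces the per-output-char rescans of the whole input (with a linear membership test against the growing index list) by a single backward pass building a char->index-stack dict, from which each output char pops its smallest unused index in O(1).
import Mathlib
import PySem

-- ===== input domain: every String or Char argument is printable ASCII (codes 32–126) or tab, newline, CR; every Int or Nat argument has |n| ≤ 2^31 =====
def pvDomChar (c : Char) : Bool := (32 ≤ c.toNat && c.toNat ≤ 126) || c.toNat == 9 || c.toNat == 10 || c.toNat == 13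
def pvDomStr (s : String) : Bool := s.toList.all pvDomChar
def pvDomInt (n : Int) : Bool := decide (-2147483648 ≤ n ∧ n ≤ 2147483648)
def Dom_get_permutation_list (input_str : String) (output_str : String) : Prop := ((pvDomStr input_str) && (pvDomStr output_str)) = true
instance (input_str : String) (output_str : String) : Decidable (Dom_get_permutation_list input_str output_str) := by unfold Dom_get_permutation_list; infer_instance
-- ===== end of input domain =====

-- B replaces A's per-output-char rescans of the input with a precomputed char->index-stack dict (asymptotically faster).


-- ===== PORT A =====
-- inner 'for i in range(len(input_str)): … break' loop of A
def pvLoopA (inChars : List Char) (co : Char) (acc : List Int) : List Nat → List Int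
  | [] => acc
  | i :: rest =>
    if co = inChars.getD i ' ' ∧ (Int.ofNat i) ∉ acc then acc ++ [Int.ofNat i]
    else pvLoopA inChars co acc rest

def get_permutation_list (input_str : String) (output_str : String) : List Int :=
  output_str.toList.foldl
    (fun acc co => pvLoopA input_str.toList co acc (List.range input_str.toList.length)) []

-- ===== PORT B =====
-- queues.setdefault(input_str[i], []).append(i), for i from len-1 down to 0
def pvBuildB (inChars : List Char) : PySem.Dict Char (List Int) :=
  (List.range inChars.length).reverse.foldl
    (fun d i => d.insert (inChars.getD i ' ') (d.getD (inChars.getD i ' ') [] ++ [Int.ofNat i]))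
    PySem.Dict.empty

-- body of 'for ch in output_str': q = queues.get(ch); if q: result.append(q.pop())
def pvStepB (st : PySem.Dict Char (List Int) × List Int) (ch : Char) :
    PySem.Dict Char (List Int) × List Int :=
  let q := st.1.getD ch []
  if q = [] then st
  else (st.1.insert ch q.dropLast, st.2 ++ [q.getLast!])

def get_permutation_list_alt (input_str : String) (output_str : String) : List Int :=
  (output_str.toList.foldl pvStepB (pvBuildB input_str.toList, [])).2

-- ===== PRECONDITION & SPEC =====
def Spec_get_permutation_list (input_str : String) (output_str : String) (out : List Int) : Prop := out = get_permutation_list_alt input_str output_str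
instance (input_str : String) (output_str : String) (out : List Int) : Decidable (Spec_get_permutation_list input_str output_str out) := by unfold Spec_get_permutation_list; infer_instance

-- ===== CLAIM (what is proved, stated in full; the proofs are below) =====
def Claim_equal_get_permutation_list : Prop := ∀ (input_str : String) (output_str : String), Dom_get_permutation_list input_str output_str → Spec_get_permutation_list input_str output_str (get_permutation_list input_str output_str)

-- ===== LEMMAS AND PROOFS =====

-- the indices of occurrences of c in inChars, increasing, as Ints
def pvIdx (inChars : List Char) (c : Char) : List Int :=
  (List.range inChars.length).filterMap
    (fun i => if inChars.getD i ' ' = c then some (Int.ofNat i) else none)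

-- remaining (unused) indices of c, given the used-list acc
def pvF (inChars : List Char) (acc : List Int) (c : Char) : List Int :=
  (pvIdx inChars c).filter (fun j => j ∉ acc)

theorem pvIdx_nodup (inChars : List Char) (c : Char) : (pvIdx inChars c).Nodup := by
  unfold pvIdx
  apply List.Nodup.filterMap _ List.nodup_range
  intro a b j ha hb
  split_ifs at ha hb <;> simp_all
  omega

theorem pvIdx_mem_char {inChars : List Char} {c : Char} {j : Int}
    (h : j ∈ pvIdx inChars c) :
    ∃ i : Nat, j = Int.ofNat i ∧ i < inChars.length ∧ inChars.getD i ' ' = c := by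
  simp only [pvIdx, List.mem_filterMap, List.mem_range] at h
  obtain ⟨i, hi, hj⟩ := h
  split_ifs at hj with hc
  · exact ⟨i, by simp_all⟩

-- A's inner loop finds the head of the remaining-indices list
theorem pvLoopA_eq (inChars : List Char) (co : Char) (acc : List Int) (l : List Nat) :
    pvLoopA inChars co acc l =
      match (l.filterMap (fun i => if inChars.getD i ' ' = co then some (Int.ofNat i) else none)).filter
          (fun j => j ∉ acc) with
      | [] => acc
      | j :: _ => acc ++ [j] := by
  induction l with
  | nil => rfl
  | cons i rest ih =>
    simp only [pvLoopA, List.filterMap_cons]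
    by_cases hc : inChars.getD i ' ' = co
    · by_cases hm : (i : Int) ∈ acc
      · rw [if_neg (fun h => h.2 hm), ih]
        simp only [List.getD] at hc
        simp [hc, hm]
      · rw [if_pos ⟨hc.symm, hm⟩]
        simp only [List.getD] at hc
        simp [hc, hm]
    · rw [if_neg (fun h => hc h.1.symm), ih]
      simp only [List.getD] at hc
      simp [hc]

-- build phase: each queue is the reversed index list
theorem pvBuildB_aux (inChars : List Char) (l : List Nat) :
    ∀ (d : PySem.Dict Char (List Int)) (c : Char),
      (l.foldl (fun d i => d.insert (inChars.getD i ' ')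
          (d.getD (inChars.getD i ' ') [] ++ [Int.ofNat i])) d).getD c []
        = d.getD c [] ++
          l.filterMap (fun i => if inChars.getD i ' ' = c then some (Int.ofNat i) else none) := by
  induction l with
  | nil => simp
  | cons i rest ih =>
    intro d c
    rw [List.foldl_cons, ih, PySem.Dict.getD_insert, List.filterMap_cons]
    by_cases hc : inChars.getD i ' ' = c
    · subst hc; simp
    · have h2 : c ≠ inChars.getD i ' ' := fun h => hc h.symm
      simp only [List.getD] at hc h2
      simp [h2, hc]

theorem pvBuildB_getD (inChars : List Char) (c : Char) :
    (pvBuildB inChars).getD c [] = (pvIdx inChars c).reverse := by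
  rw [pvBuildB, pvBuildB_aux, PySem.Dict.getD_empty, List.nil_append,
    List.filterMap_reverse, pvIdx]

theorem pvF_append_ne (inChars : List Char) (acc : List Int) (c co : Char) (j : Int)
    (hj : j ∈ pvIdx inChars co) (hne : c ≠ co) :
    pvF inChars (acc ++ [j]) c = pvF inChars acc c := by
  unfold pvF
  apply List.filter_congr
  intro x hx
  obtain ⟨ix, hxj, _, hxc⟩ := pvIdx_mem_char hx
  obtain ⟨ij, hjj, _, hjc⟩ := pvIdx_mem_char hj
  have hxne : x ≠ j := by
    intro h
    apply hne
    rw [← hxc, ← hjc]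
    congr 1
    rw [hxj, hjj] at h
    exact Int.ofNat.inj h
  simp [hxne]

theorem pvF_pop (inChars : List Char) (acc : List Int) (co : Char) (j : Int) (t : List Int)
    (hF : pvF inChars acc co = j :: t) :
    pvF inChars (acc ++ [j]) co = t := by
  have hnd : (pvF inChars acc co).Nodup := (pvIdx_nodup inChars co).filter _
  rw [hF] at hnd
  have hjt : j ∉ t := (List.nodup_cons.mp hnd).1
  have step1 : pvF inChars (acc ++ [j]) co
      = (pvF inChars acc co).filter (fun x => x ≠ j) := by
    unfold pvF
    rw [List.filter_filter]
    apply List.filter_congr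
    intro x _
    by_cases h1 : x = j <;> by_cases h2 : x ∈ acc <;> simp [h1, h2]
  rw [step1, hF, List.filter_cons]
  simp only [ne_eq, not_true_eq_false, decide_false, Bool.false_eq_true, if_false]
  apply List.filter_eq_self.mpr
  intro x hx
  have : x ≠ j := fun h => hjt (h ▸ hx)
  simp [this]

theorem pvLoopA_range (inChars : List Char) (co : Char) (acc : List Int) :
    pvLoopA inChars co acc (List.range inChars.length) =
      match pvF inChars acc co with
      | [] => acc
      | j :: _ => acc ++ [j] := by
  rw [pvLoopA_eq]; rfl

-- main invariant step
theorem pvConsume (inChars : List Char) (out : List Char) :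
    ∀ (acc : List Int) (d : PySem.Dict Char (List Int)),
      (∀ c, d.getD c [] = (pvF inChars acc c).reverse) →
      (out.foldl pvStepB (d, acc)).2 =
        out.foldl (fun acc co => pvLoopA inChars co acc (List.range inChars.length)) acc := by
  induction out with
  | nil => intro acc d _; rfl
  | cons co rest ih =>
    intro acc d H
    rw [List.foldl_cons, List.foldl_cons, pvLoopA_range]
    have hq : d.getD co [] = (pvF inChars acc co).reverse := H co
    show (rest.foldl pvStepB (pvStepB (d, acc) co)).2 = _
    rcases hF : pvF inChars acc co with _ | ⟨j, t⟩
    · have hnil : d.getD co [] = [] := by rw [hq, hF, List.reverse_nil]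
      have : pvStepB (d, acc) co = (d, acc) := by
        simp [pvStepB, hnil]
      rw [this]
      exact ih acc d H
    · have hj_mem : j ∈ pvIdx inChars co := by
        have : j ∈ pvF inChars acc co := by rw [hF]; exact List.mem_cons_self
        exact (List.mem_filter.mp this).1
      have hq' : d.getD co [] = t.reverse ++ [j] := by
        rw [hq, hF, List.reverse_cons]
      have hstep : pvStepB (d, acc) co =
          (d.insert co t.reverse, acc ++ [j]) := by
        simp [pvStepB, hq']
      rw [hstep]
      apply ih
      intro c
      by_cases hc : c = co
      · subst hc
        rw [PySem.Dict.getD_insert, if_pos rfl, pvF_pop inChars acc c j t hF]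
      · rw [PySem.Dict.getD_insert, if_neg hc, H c,
          pvF_append_ne inChars acc c co j hj_mem hc]

-- ===== VERDICT (by name: the statement is the Claim_ definition above) =====
theorem get_permutation_list_spec : Claim_equal_get_permutation_list := by
  intro input_str output_str _
  unfold Spec_get_permutation_list get_permutation_list get_permutation_list_alt
  exact (pvConsume input_str.toList output_str.toList [] (pvBuildB input_str.toList)
    (fun c => by simpa [pvF] using pvBuildB_getD input_str.toList c)).symm
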